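-- pv_equiv track=rewrite | github.com/kaelthasmanu/SquidStats | routes/logs_routes.py | build_response_summary
-- ===== SOURCE A (Python) =====
-- def categorize_response(code):
--     if code >= 100 and code <= 199:
--         return "informational"
--     if code >= 200 and code <= 299:
--         return "successful"
--     if code >= 300 and code <= 399:
--         return "redirection"
--     if code >= 400 and code <= 499:
--         return "clientError"
--     if code >= 500 and code <= 599:
--         return "serverError"
--     return "unknown"
--
-- def build_response_summary(logs):
--     summary = {
--         "informational": 0,
--         "successful": 0,
--         "redirection": 0,
--         "clientError": 0,
--         "serverError": 0,
--         "unknown": 0,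
--     }
--     for log in logs:
--         summary[categorize_response(log["response"])] += 1
--     return summary
-- ===== SOURCE B (Python) =====
-- def build_response_summary(logs):
--     codes = [log["response"] for log in logs]
--     n_info = sum(1 for c in codes if 100 <= c < 200)
--     n_ok = sum(1 for c in codes if 200 <= c < 300)
--     n_redir = sum(1 for c in codes if 300 <= c < 400)
--     n_client = sum(1 for c in codes if 400 <= c < 500)
--     n_server = sum(1 for c in codes if 500 <= c < 600)
--     return {
--         "informational": n_info,
--         "successful": n_ok,
--         "redirection": n_redir,
--         "clientError": n_client,
--         "serverError": n_server,
--         "unknown": len(codes) - (n_info + n_ok + n_redir + n_client + n_server),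
--     }
-- ===== Notes on version B (the rewrite author's own statement) =====
-- stated objective: alternative
-- what changed: Replaces the single pass that classifies each code and increments a mutable pre-seeded dict by staged whole-list passes: extract the codes once, count each of the five HTTP categories with its own range-filter pass, and derive 'unknown' by subtraction from the total length.
import Mathlib
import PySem

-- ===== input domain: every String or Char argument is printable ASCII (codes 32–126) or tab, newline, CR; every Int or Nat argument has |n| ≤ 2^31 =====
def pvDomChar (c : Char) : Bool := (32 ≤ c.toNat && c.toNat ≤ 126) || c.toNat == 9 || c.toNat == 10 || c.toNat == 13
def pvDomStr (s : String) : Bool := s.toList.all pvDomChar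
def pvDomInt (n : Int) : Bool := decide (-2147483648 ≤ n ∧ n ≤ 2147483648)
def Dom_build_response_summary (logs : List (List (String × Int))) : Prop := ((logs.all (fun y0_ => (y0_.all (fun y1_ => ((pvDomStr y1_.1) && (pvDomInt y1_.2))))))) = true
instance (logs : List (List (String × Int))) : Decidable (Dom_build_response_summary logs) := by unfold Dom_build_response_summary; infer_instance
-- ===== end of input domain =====

-- B replaces A's single classify-and-increment pass over a mutable dict by staged passes:
-- extract the codes once, count each category with its own range pass, derive "unknown" by subtraction.

-- ===== PORT A =====
def categorize_response (code : Int) : String :=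
  if 100 ≤ code ∧ code ≤ 199 then "informational"
  else if 200 ≤ code ∧ code ≤ 299 then "successful"
  else if 300 ≤ code ∧ code ≤ 399 then "redirection"
  else if 400 ≤ code ∧ code ≤ 499 then "clientError"
  else if 500 ≤ code ∧ code ≤ 599 then "serverError"
  else "unknown"

def pvInitSummary : PySem.Dict String Int :=
  ((((((PySem.Dict.empty.insert "informational" 0).insert "successful" 0).insert
      "redirection" 0).insert "clientError" 0).insert "serverError" 0).insert "unknown" 0)

-- A raises KeyError when a log lacks the "response" key; those inputs are excluded by Pre_
-- below (the final .getD fallback is never reached inside Pre_).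
def build_response_summary (logs : List (List (String × Int))) : List (String × Int) :=
  ((logs.foldl
      (fun acc log => acc.bind (fun d =>
        ((PySem.Dict.mk log).get? "response").map (fun c =>
          d.modify (categorize_response c) 0 (· + 1))))
      (some pvInitSummary)).getD pvInitSummary).items

-- ===== PORT B =====
-- [log["response"] for log in logs] (KeyError = none, excluded by Pre_), then five range
-- passes (each 'sum(1 for c in codes if …)' is a countP) and "unknown" by subtraction.
def build_response_summary_alt (logs : List (List (String × Int))) : List (String × Int) :=
  match logs.mapM (fun log => (PySem.Dict.mk log).get? "response") with
  | none => []
  | some codes =>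
    let n_info : Int := codes.countP (fun c => decide (100 ≤ c ∧ c < 200))
    let n_ok : Int := codes.countP (fun c => decide (200 ≤ c ∧ c < 300))
    let n_redir : Int := codes.countP (fun c => decide (300 ≤ c ∧ c < 400))
    let n_client : Int := codes.countP (fun c => decide (400 ≤ c ∧ c < 500))
    let n_server : Int := codes.countP (fun c => decide (500 ≤ c ∧ c < 600))
    [("informational", n_info), ("successful", n_ok), ("redirection", n_redir),
     ("clientError", n_client), ("serverError", n_server),
     ("unknown", (codes.length : Int) - (n_info + n_ok + n_redir + n_client + n_server))]

-- ===== PRECONDITION & SPEC =====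
-- Pre_ excludes exactly the inputs where A (and B) raise KeyError: a log without a "response" key.
def Pre_build_response_summary (logs : List (List (String × Int))) : Prop :=
  (logs.all (fun log => log.any (fun kv => kv.1 == "response"))) = true
instance (logs : List (List (String × Int))) : Decidable (Pre_build_response_summary logs) := by
  unfold Pre_build_response_summary; infer_instance
def pvWitness_build_response_summary : (List (List (String × Int))) :=
  [[("response", 200)], [("response", 404)], [("response", 777)]]
def Spec_build_response_summary (logs : List (List (String × Int))) (out : List (String × Int)) : Prop := out = build_response_summary_alt logs
instance (logs : List (List (String × Int))) (out : List (String × Int)) : Decidable (Spec_build_response_summary logs out) := by unfold Spec_build_response_summary; infer_instance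

-- ===== CLAIM (what is proved, stated in full; the proofs are below) =====
def Claim_equal_build_response_summary : Prop := ∀ (logs : List (List (String × Int))), Dom_build_response_summary logs → Pre_build_response_summary logs → Spec_build_response_summary logs (build_response_summary logs)

-- ===== LEMMAS AND PROOFS =====

-- a log with the "response" key yields a code
lemma get_response_isSome (log : List (String × Int))
    (h : log.any (fun kv => kv.1 == "response") = true) :
    ∃ c, (PySem.Dict.mk log).get? "response" = some c := by
  induction log with
  | nil => simp at h
  | cons kv rest ih =>
    rw [PySem.Dict.get?_mk_cons]
    simp only [List.any_cons, Bool.or_eq_true] at h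
    by_cases hk : kv.1 == "response"
    · simp [hk]
    · simp only [hk] at *
      exact ih (h.resolve_left (by simp_all))

-- Pre_ makes the comprehension succeed
lemma mapM_isSome_of_pre (logs : List (List (String × Int)))
    (h : Pre_build_response_summary logs) :
    ∃ codes, logs.mapM (fun log => (PySem.Dict.mk log).get? "response") = some codes := by
  induction logs with
  | nil => exact ⟨[], rfl⟩
  | cons log rest ih =>
    unfold Pre_build_response_summary at *
    simp only [List.all_cons, Bool.and_eq_true] at h
    obtain ⟨c, hc⟩ := get_response_isSome log h.1
    obtain ⟨cs, hcs⟩ := ih h.2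
    exact ⟨c :: cs, by simp [List.mapM_cons, hc, hcs]⟩

-- A's option-threading fold is the plain fold over the extracted codes
lemma foldl_bind_eq_foldl (logs : List (List (String × Int))) (codes : List Int)
    (d : PySem.Dict String Int)
    (h : logs.mapM (fun log => (PySem.Dict.mk log).get? "response") = some codes) :
    logs.foldl
      (fun acc log => acc.bind (fun d =>
        ((PySem.Dict.mk log).get? "response").map (fun c =>
          d.modify (categorize_response c) 0 (· + 1))))
      (some d)
    = some (codes.foldl (fun d c => d.modify (categorize_response c) 0 (· + 1)) d) := by
  induction logs generalizing codes d with
  | nil => simp_all [List.mapM_nil]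
  | cons log rest ih =>
    rw [List.mapM_cons] at h
    cases hg : (PySem.Dict.mk log).get? "response" with
    | none => simp [hg] at h
    | some c =>
      rw [hg] at h
      cases hr : rest.mapM (fun log => (PySem.Dict.mk log).get? "response") with
      | none => simp [hr] at h
      | some cs =>
        rw [hr] at h
        obtain rfl : c :: cs = codes := by simpa using h
        simp only [List.foldl_cons, Option.bind_some, hg, Option.map_some]
        exact ih cs _ hr

-- pointwise characterisations of the category strings
lemma cat_info (c : Int) : (categorize_response c == "informational") = decide (100 ≤ c ∧ c < 200) := by
  rw [Bool.eq_iff_iff]; simp only [beq_iff_eq, decide_eq_true_eq]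
  unfold categorize_response; split_ifs <;> simp <;> omega

lemma cat_ok (c : Int) : (categorize_response c == "successful") = decide (200 ≤ c ∧ c < 300) := by
  rw [Bool.eq_iff_iff]; simp only [beq_iff_eq, decide_eq_true_eq]
  unfold categorize_response; split_ifs <;> simp <;> omega

lemma cat_redir (c : Int) : (categorize_response c == "redirection") = decide (300 ≤ c ∧ c < 400) := by
  rw [Bool.eq_iff_iff]; simp only [beq_iff_eq, decide_eq_true_eq]
  unfold categorize_response; split_ifs <;> simp <;> omega

lemma cat_client (c : Int) : (categorize_response c == "clientError") = decide (400 ≤ c ∧ c < 500) := by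
  rw [Bool.eq_iff_iff]; simp only [beq_iff_eq, decide_eq_true_eq]
  unfold categorize_response; split_ifs <;> simp <;> omega

lemma cat_server (c : Int) : (categorize_response c == "serverError") = decide (500 ≤ c ∧ c < 600) := by
  rw [Bool.eq_iff_iff]; simp only [beq_iff_eq, decide_eq_true_eq]
  unfold categorize_response; split_ifs <;> simp <;> omega

lemma cat_unknown (c : Int) : (categorize_response c == "unknown") = decide (¬ (100 ≤ c ∧ c < 600)) := by
  rw [Bool.eq_iff_iff]; simp only [beq_iff_eq, decide_eq_true_eq]
  unfold categorize_response; split_ifs <;> simp <;> omega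

lemma cat_mem_keys (c : Int) : categorize_response c ∈ pvInitSummary.keys := by
  unfold categorize_response; split_ifs <;> decide

-- count of a category over the mapped list is a range countP over the codes
lemma count_cat (codes : List Int) (name : String) (p : Int → Bool)
    (hp : ∀ c : Int, (categorize_response c == name) = p c) :
    (codes.map categorize_response).count name = codes.countP p := by
  rw [List.count_eq_countP, List.countP_map]
  exact List.countP_congr (fun c _ => by simp [Function.comp, hp c])

-- the five in-range counts split the in-range total
lemma split_ranges (codes : List Int) :
    codes.countP (fun c => decide (100 ≤ c ∧ c < 600))
      = codes.countP (fun c => decide (100 ≤ c ∧ c < 200))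
        + codes.countP (fun c => decide (200 ≤ c ∧ c < 300))
        + codes.countP (fun c => decide (300 ≤ c ∧ c < 400))
        + codes.countP (fun c => decide (400 ≤ c ∧ c < 500))
        + codes.countP (fun c => decide (500 ≤ c ∧ c < 600)) := by
  induction codes with
  | nil => rfl
  | cons c rest ih =>
    simp only [List.countP_cons, decide_eq_true_eq]
    split_ifs <;> omega

-- the out-of-range count is the complement of the in-range count
lemma unknown_count (codes : List Int) :
    codes.countP (fun c => decide (¬ (100 ≤ c ∧ c < 600)))
      = codes.length - codes.countP (fun c => decide (100 ≤ c ∧ c < 600)) := by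
  have h := List.length_eq_countP_add_countP (l := codes)
    (p := fun c => decide (100 ≤ c ∧ c < 600))
  have hc : codes.countP (fun a => decide (¬ (decide (100 ≤ a ∧ a < 600) = true)))
      = codes.countP (fun c => decide (¬ (100 ≤ c ∧ c < 600))) :=
    List.countP_congr (fun c _ => by simp)
  rw [hc] at h
  omega

-- items of the counting fold, for any list of keys drawn from the pre-seeded dict
lemma items_fold (l : List String) (hl : ∀ x ∈ l, x ∈ pvInitSummary.keys) :
    (l.foldl (fun d x => d.modify x 0 (· + 1)) pvInitSummary).items
      = [("informational", (l.count "informational" : Int)),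
         ("successful", (l.count "successful" : Int)),
         ("redirection", (l.count "redirection" : Int)),
         ("clientError", (l.count "clientError" : Int)),
         ("serverError", (l.count "serverError" : Int)),
         ("unknown", (l.count "unknown" : Int))] := by
  have hkeys : (l.foldl (fun d x => d.modify x 0 (· + 1)) pvInitSummary).keys
      = pvInitSummary.keys := by
    rw [PySem.Dict.keys_foldl_modify, PySem.Set.update_eq_append_filter]
    have hf : (PySem.Set.ofList l).filter
        (fun y => !(PySem.Set.contains pvInitSummary.keys y)) = [] := by
      rw [List.filter_eq_nil_iff]
      intro y hy
      have hmem : y ∈ pvInitSummary.keys := hl y (by simpa [pysem] using hy)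
      simp [pysem, hmem]
    rw [hf, List.append_nil]
  have hnd : (l.foldl (fun d x => d.modify x 0 (· + 1)) pvInitSummary).keys.Nodup := by
    rw [hkeys]; decide
  rw [PySem.Dict.items_eq_map_keys _ hnd 0, hkeys]
  have hk : pvInitSummary.keys
      = ["informational", "successful", "redirection", "clientError", "serverError", "unknown"] := by
    decide
  rw [hk]
  simp only [List.map_cons, List.map_nil, PySem.Dict.getD_foldl_modify_add_one]
  norm_num [pvInitSummary, PySem.Dict.getD_insert]

-- ===== VERDICT (by name: the statement is the Claim_ definition above) =====
theorem build_response_summary_spec : Claim_equal_build_response_summary := by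
  intro logs _ hpre
  unfold Spec_build_response_summary
  obtain ⟨codes, hm⟩ := mapM_isSome_of_pre logs hpre
  unfold build_response_summary
  have hfm : (codes.map categorize_response).foldl (fun d x => d.modify x 0 (· + 1)) pvInitSummary
      = codes.foldl (fun d c => d.modify (categorize_response c) 0 (· + 1)) pvInitSummary := by
    rw [List.foldl_map]
  rw [foldl_bind_eq_foldl logs codes pvInitSummary hm, Option.getD_some, ← hfm,
    items_fold (codes.map categorize_response) (by intro x hx; obtain ⟨c, -, rfl⟩ := List.mem_map.mp hx; exact cat_mem_keys c)]
  simp only [build_response_summary_alt, hm]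
  rw [count_cat codes _ _ cat_info, count_cat codes _ _ cat_ok,
    count_cat codes _ _ cat_redir, count_cat codes _ _ cat_client,
    count_cat codes _ _ cat_server, count_cat codes _ _ cat_unknown]
  have h1 := split_ranges codes
  have h2 := unknown_count codes
  have h3 := codes.countP_le_length (p := fun c => decide (100 ≤ c ∧ c < 600))
  simp only [List.cons.injEq, Prod.mk.injEq, and_true, true_and]
  omega
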